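-- pv_equiv track=rewrite | github.com/junseong2im/innovative_perfume_ai | fragrance_ai/core/response_optimizer.py | _filter_response_fields
-- ===== SOURCE A (Python) =====
-- from typing import Any, Dict, List, Optional, Union, AsyncGenerator, Callable
--
-- def _filter_response_fields(
--
--     data: Any,
--     include_fields: Optional[List[str]] = None,
--     exclude_fields: Optional[List[str]] = None
-- ) -> Any:
--     """응답 필드 필터링"""
--     if not isinstance(data, dict):
--         return data
--
--     filtered_data = data.copy()
--
--     # 제외 필드 제거
--     if exclude_fields:
--         for field in exclude_fields:
--             filtered_data.pop(field, None)
--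
--     # 포함 필드만 유지
--     if include_fields:
--         filtered_data = {
--             key: value for key, value in filtered_data.items()
--             if key in include_fields
--         }
--
--     return filtered_data
-- ===== SOURCE B (Python) =====
-- def _filter_response_fields(
--     data,
--     include_fields=None,
--     exclude_fields=None
-- ):
--     """Single pass over data.items() with set-based membership tests."""
--     if not isinstance(data, dict):
--         return data
--     exc = set(exclude_fields) if exclude_fields else None
--     inc = set(include_fields) if include_fields else None
--     return {
--         k: v for k, v in data.items()
--         if (exc is None or k not in exc) and (inc is None or k in inc)
--     }
-- ===== Notes on version B (the rewrite author's own statement) =====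
-- stated objective: faster
-- what changed: Replaces A's copy-then-mutating exclude pop-loop plus separate include comprehension with one single-pass comprehension over data.items(), using sets built once for both membership tests.
import Mathlib
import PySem

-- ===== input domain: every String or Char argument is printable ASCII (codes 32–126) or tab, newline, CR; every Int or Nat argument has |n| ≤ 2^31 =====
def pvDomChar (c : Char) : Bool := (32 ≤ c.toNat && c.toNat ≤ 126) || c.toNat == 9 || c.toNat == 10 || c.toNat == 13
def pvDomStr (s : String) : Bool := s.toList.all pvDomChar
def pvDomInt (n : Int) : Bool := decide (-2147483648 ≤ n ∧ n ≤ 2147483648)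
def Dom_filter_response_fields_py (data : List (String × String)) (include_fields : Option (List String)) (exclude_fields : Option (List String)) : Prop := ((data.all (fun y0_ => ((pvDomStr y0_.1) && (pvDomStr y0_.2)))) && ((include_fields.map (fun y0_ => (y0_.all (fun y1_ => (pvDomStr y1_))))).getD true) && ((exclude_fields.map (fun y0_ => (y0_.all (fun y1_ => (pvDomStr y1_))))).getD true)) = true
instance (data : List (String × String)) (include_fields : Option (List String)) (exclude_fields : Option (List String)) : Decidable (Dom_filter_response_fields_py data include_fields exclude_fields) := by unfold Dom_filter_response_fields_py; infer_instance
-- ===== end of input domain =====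

-- B merges A's exclude pop-loop and include comprehension into one single-pass comprehension over data.items() with set-based membership (objective: faster, measured).


-- ===== PORT A =====
def filter_response_fields_py (data : List (String × String)) (include_fields : Option (List String)) (exclude_fields : Option (List String)) : List (String × String) :=
  -- filtered_data = data.copy()
  let filtered0 : PySem.Dict String String := PySem.Dict.ofList data
  -- if exclude_fields: for field in exclude_fields: filtered_data.pop(field, None)
  let filtered1 : PySem.Dict String String :=
    match exclude_fields with
    | some ex => if ex.isEmpty then filtered0 else ex.foldl (fun acc field => acc.erase field) filtered0
    | none => filtered0
  -- if include_fields: filtered_data = {k: v for k, v in filtered_data.items() if k in include_fields}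
  let filtered2 : PySem.Dict String String :=
    match include_fields with
    | some il => if il.isEmpty then filtered1 else PySem.Dict.mk (filtered1.items.filter (fun kv => il.contains kv.1))
    | none => filtered1
  filtered2.items

-- ===== PORT B =====
def filter_response_fields_py_alt (data : List (String × String)) (include_fields : Option (List String)) (exclude_fields : Option (List String)) : List (String × String) :=
  -- exc = set(exclude_fields) if exclude_fields else None
  let exc : Option (PySem.Set String) :=
    match exclude_fields with
    | some ex => if ex.isEmpty then none else some (PySem.Set.ofList ex)
    | none => none
  -- inc = set(include_fields) if include_fields else None
  let inc : Option (PySem.Set String) :=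
    match include_fields with
    | some il => if il.isEmpty then none else some (PySem.Set.ofList il)
    | none => none
  -- {k: v for k, v in data.items() if (exc is None or k not in exc) and (inc is None or k in inc)}
  (PySem.Dict.ofList data).items.filter (fun kv =>
    (match exc with | some s => !PySem.Set.contains s kv.1 | none => true)
    && (match inc with | some s => PySem.Set.contains s kv.1 | none => true))

-- ===== PRECONDITION & SPEC =====
def Spec_filter_response_fields_py (data : List (String × String)) (include_fields : Option (List String)) (exclude_fields : Option (List String)) (out : List (String × String)) : Prop := out = filter_response_fields_py_alt data include_fields exclude_fields
instance (data : List (String × String)) (include_fields : Option (List String)) (exclude_fields : Option (List String)) (out : List (String × String)) : Decidable (Spec_filter_response_fields_py data include_fields exclude_fields out) := by unfold Spec_filter_response_fields_py; infer_instance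

-- ===== CLAIM (what is proved, stated in full; the proofs are below) =====
def Claim_equal_filter_response_fields_py : Prop := ∀ (data : List (String × String)) (include_fields : Option (List String)) (exclude_fields : Option (List String)), Dom_filter_response_fields_py data include_fields exclude_fields → Spec_filter_response_fields_py data include_fields exclude_fields (filter_response_fields_py data include_fields exclude_fields)

-- ===== LEMMAS AND PROOFS =====
lemma items_foldl_erase (ex : List String) (d : PySem.Dict String String) :
    (ex.foldl (fun acc field => acc.erase field) d).items
      = d.items.filter (fun kv => !ex.contains kv.1) := by
  induction ex generalizing d with
  | nil => simp
  | cons f rest ih =>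
    simp only [List.foldl_cons]
    rw [ih]
    simp only [PySem.Dict.erase, List.filter_filter]
    apply List.filter_congr
    intro kv _
    simp only [List.contains_cons]
    by_cases h : kv.1 = f <;> simp [h, BEq.comm, Bool.and_comm]


-- ===== VERDICT (by name: the statement is the Claim_ definition above) =====
theorem filter_response_fields_py_spec : Claim_equal_filter_response_fields_py := by
  intro data include_fields exclude_fields _
  unfold Spec_filter_response_fields_py filter_response_fields_py filter_response_fields_py_alt
  cases exclude_fields with
  | none =>
    cases include_fields with
    | none => simp
    | some il =>
      by_cases hil : il.isEmpty
      · rw [List.isEmpty_iff] at hil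
        subst hil; simp
      · simp [hil]
  | some ex =>
    by_cases hex : ex.isEmpty
    · rw [List.isEmpty_iff] at hex
      subst hex
      cases include_fields with
      | none => simp
      | some il =>
        by_cases hil : il.isEmpty
        · rw [List.isEmpty_iff] at hil
          subst hil; simp
        · simp [hil]
    · cases include_fields with
      | none => simp [hex, items_foldl_erase]
      | some il =>
        by_cases hil : il.isEmpty
        · rw [List.isEmpty_iff] at hil
          subst hil; simp [hex, items_foldl_erase]
        · simp [hex, hil, items_foldl_erase, List.filter_filter, Bool.and_comm]
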